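-- pv_equiv track=rewrite | github.com/trungtranle/python_CSC | thi_python_coban/kiem_tra_chuoi_lib.py | kiem_tra_chuoi
-- ===== SOURCE A (Python) =====
-- def kiem_tra_chuoi(string):
--     string_list = list(string)
--     vowel = ['a', 'e', 'i', 'o', 'u']
--     not_appear =[]
--     for i in range(0,5):
--         if vowel[i] in string_list:
--             not_appear.append(i+1)
--         else:
--             not_appear.append(i)
--     result = 'Còn thiếu nguyên âm '
--     for i in range(0, len(not_appear)):
--         if not_appear[i] == i:
--             result = result + vowel[i] + ' '
--     if result == 'Còn thiếu nguyên âm ':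
--         result = 'Tìm thấy tất cả nguyên âm'
--     return result
-- ===== SOURCE B (Python) =====
-- def kiem_tra_chuoi(string):
--     result = 'Còn thiếu nguyên âm '
--     for v in ['a', 'e', 'i', 'o', 'u']:
--         if v not in string:
--             result = result + v + ' '
--     if result == 'Còn thiếu nguyên âm ':
--         return 'Tìm thấy tất cả nguyên âm'
--     return result
-- ===== Notes on version B (the rewrite author's own statement) =====
-- stated objective: simpler
-- what changed: Drops A's intermediate not_appear index table and its second reinterpreting pass; B does one direct pass over the vowel list appending each missing vowel, testing membership on the string itself instead of a list(string) copy.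
import Mathlib
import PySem

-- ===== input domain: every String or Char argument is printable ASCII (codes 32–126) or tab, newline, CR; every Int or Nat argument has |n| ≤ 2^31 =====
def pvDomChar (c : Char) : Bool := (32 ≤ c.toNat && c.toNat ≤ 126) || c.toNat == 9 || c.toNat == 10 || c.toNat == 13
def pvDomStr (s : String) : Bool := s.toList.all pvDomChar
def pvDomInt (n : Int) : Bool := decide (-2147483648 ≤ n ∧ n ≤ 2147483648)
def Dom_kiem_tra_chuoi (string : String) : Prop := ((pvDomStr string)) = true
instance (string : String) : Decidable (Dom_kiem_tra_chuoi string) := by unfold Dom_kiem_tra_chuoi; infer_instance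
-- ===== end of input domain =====

-- B drops A's intermediate not_appear index table and second pass, appending each missing vowel in one direct pass (objective: simpler).


-- ===== PORT A =====
-- Port of A: builds the not_appear index table in one pass, then a second pass
-- reinterprets it to assemble the result string.
def kiem_tra_chuoi (string : String) : String :=
  let string_list := string.toList
  let vowel : List Char := ['a', 'e', 'i', 'o', 'u']
  let not_appear := (List.range 5).foldl (fun acc i =>
    if string_list.contains (vowel.getD i ' ') then acc ++ [i + 1] else acc ++ [i]) ([] : List Nat)
  let result := (List.range not_appear.length).foldl (fun r i =>
    if not_appear.getD i 999 == i then r ++ String.ofList [vowel.getD i ' '] ++ " " else r)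
    "Còn thiếu nguyên âm "
  if result == "Còn thiếu nguyên âm " then "Tìm thấy tất cả nguyên âm" else result

-- ===== PORT B =====
-- B: one direct pass over the vowel list, appending each missing vowel.
def kiem_tra_chuoi_alt (string : String) : String :=
  let result := (['a', 'e', 'i', 'o', 'u'] : List Char).foldl (fun r v =>
    if string.toList.contains v then r else r ++ String.ofList [v] ++ " ")
    "Còn thiếu nguyên âm "
  if result == "Còn thiếu nguyên âm " then "Tìm thấy tất cả nguyên âm" else result

-- ===== PRECONDITION & SPEC =====
def Spec_kiem_tra_chuoi (string : String) (out : String) : Prop := out = kiem_tra_chuoi_alt string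
instance (string : String) (out : String) : Decidable (Spec_kiem_tra_chuoi string out) := by unfold Spec_kiem_tra_chuoi; infer_instance

-- ===== CLAIM (what is proved, stated in full; the proofs are below) =====
def Claim_equal_kiem_tra_chuoi : Prop := ∀ (string : String), Dom_kiem_tra_chuoi string → Spec_kiem_tra_chuoi string (kiem_tra_chuoi string)

-- ===== LEMMAS AND PROOFS =====

-- ===== VERDICT (by name: the statement is the Claim_ definition above) =====
theorem kiem_tra_chuoi_spec : Claim_equal_kiem_tra_chuoi := by
  intro s _
  unfold Spec_kiem_tra_chuoi kiem_tra_chuoi kiem_tra_chuoi_alt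
  by_cases ha : 'a' ∈ s.toList <;>
  by_cases he : 'e' ∈ s.toList <;>
  by_cases hi : 'i' ∈ s.toList <;>
  by_cases ho : 'o' ∈ s.toList <;>
  by_cases hu : 'u' ∈ s.toList <;>
    simp [ha, he, hi, ho, hu, List.range_succ]
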